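-- pv_equiv track=rewrite | github.com/TheNoiy11/2016-Python | Tutorial9.py | sumOddEvenZero
-- ===== SOURCE A (Python) =====
-- def sumOddEvenZero(list):
-- 	if len(list) == 0:
-- 		return(0,0,0)
--
-- 	if list[0] == 0:
-- 		sumEven, sumOdd, amountZero = sumOddEvenZero(list[1:])
-- 		return (list[0]+sumEven, sumOdd, amountZero+1)
-- 	elif list[0] % 2 == 0:
-- 		sumEven, sumOdd, amountZero = sumOddEvenZero(list[1:])
-- 		return (list[0]+sumEven, sumOdd, amountZero)
-- 	else:
-- 		sumEven, sumOdd, amountZero = sumOddEvenZero(list[1:])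
-- 		return (sumEven, list[0]+sumOdd, amountZero)
-- ===== SOURCE B (Python) =====
-- def sumOddEvenZero(list):
--     sumEven = 0
--     sumOdd = 0
--     amountZero = 0
--     for x in list:
--         if x == 0:
--             amountZero += 1
--         elif x % 2 == 0:
--             sumEven += x
--         else:
--             sumOdd += x
--     return (sumEven, sumOdd, amountZero)
-- ===== Notes on version B (the rewrite author's own statement) =====
-- stated objective: simpler
-- what changed: Replaces the head/tail recursion (which copies the tail with list[1:] at every step and rebuilds the tuple on the way back up) with a single iterative accumulator loop; the pointless 0+sumEven in the zero branch is dropped.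
import Mathlib
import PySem

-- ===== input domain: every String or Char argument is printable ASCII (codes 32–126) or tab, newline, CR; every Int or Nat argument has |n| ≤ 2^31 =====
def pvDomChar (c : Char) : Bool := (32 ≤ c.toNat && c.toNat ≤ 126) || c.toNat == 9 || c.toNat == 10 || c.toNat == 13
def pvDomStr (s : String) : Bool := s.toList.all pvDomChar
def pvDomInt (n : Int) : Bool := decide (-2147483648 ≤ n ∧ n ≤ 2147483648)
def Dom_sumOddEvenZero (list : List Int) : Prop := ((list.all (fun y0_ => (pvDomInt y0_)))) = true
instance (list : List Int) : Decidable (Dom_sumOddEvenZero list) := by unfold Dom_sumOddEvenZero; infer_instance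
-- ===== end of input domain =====

-- B replaces A's head/tail recursion by one iterative accumulator pass (simpler, constant stack).

-- ===== PORT A =====
def sumOddEvenZero (list : List Int) : Int × Int × Int :=
  match list with
  | [] => (0, 0, 0)
  | x :: rest =>
    if x == 0 then
      let (sumEven, sumOdd, amountZero) := sumOddEvenZero rest
      (x + sumEven, sumOdd, amountZero + 1)
    else if PySem.Int.mod x 2 == 0 then
      let (sumEven, sumOdd, amountZero) := sumOddEvenZero rest
      (x + sumEven, sumOdd, amountZero)
    else
      let (sumEven, sumOdd, amountZero) := sumOddEvenZero rest
      (sumEven, x + sumOdd, amountZero)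

-- ===== PORT B =====
-- B's loop body (the branch taken for one element x on the accumulator state)
def bStep (acc : Int × Int × Int) (x : Int) : Int × Int × Int :=
  let (sumEven, sumOdd, amountZero) := acc
  if x == 0 then (sumEven, sumOdd, amountZero + 1)
  else if PySem.Int.mod x 2 == 0 then (sumEven + x, sumOdd, amountZero)
  else (sumEven, sumOdd + x, amountZero)

def sumOddEvenZero_alt (list : List Int) : Int × Int × Int :=
  list.foldl bStep (0, 0, 0)

-- ===== PRECONDITION & SPEC =====
def Spec_sumOddEvenZero (list : List Int) (out : Int × Int × Int) : Prop := out = sumOddEvenZero_alt list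
instance (list : List Int) (out : Int × Int × Int) : Decidable (Spec_sumOddEvenZero list out) := by unfold Spec_sumOddEvenZero; infer_instance

-- ===== CLAIM (what is proved, stated in full; the proofs are below) =====
def Claim_equal_sumOddEvenZero : Prop := ∀ (list : List Int), Dom_sumOddEvenZero list → Spec_sumOddEvenZero list (sumOddEvenZero list)

-- ===== LEMMAS AND PROOFS =====
theorem foldl_shift (l : List Int) (se so az : Int) :
    l.foldl bStep (se, so, az)
    = (se + (sumOddEvenZero l).1, so + (sumOddEvenZero l).2.1, az + (sumOddEvenZero l).2.2) := by
  induction l generalizing se so az with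
  | nil => simp [sumOddEvenZero]
  | cons x rest ih =>
    rcases hA : sumOddEvenZero rest with ⟨a, b, c⟩
    simp only [sumOddEvenZero, hA, List.foldl_cons, beq_iff_eq]
    split_ifs with h0 h2
    · rw [show bStep (se, so, az) x = (se, so, az + 1) from by
        simp only [bStep, beq_iff_eq]; rw [if_pos h0], ih, hA]
      simp only [Prod.mk.injEq]
      and_intros <;> first | trivial | omega
    · rw [show bStep (se, so, az) x = (se + x, so, az) from by
        simp only [bStep, beq_iff_eq]; rw [if_neg h0, if_pos h2], ih, hA]
      simp only [Prod.mk.injEq]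
      and_intros <;> first | trivial | omega
    · rw [show bStep (se, so, az) x = (se, so + x, az) from by
        simp only [bStep, beq_iff_eq]; rw [if_neg h0, if_neg h2], ih, hA]
      simp only [Prod.mk.injEq]
      and_intros <;> first | trivial | omega

-- ===== VERDICT (by name: the statement is the Claim_ definition above) =====
theorem sumOddEvenZero_spec : Claim_equal_sumOddEvenZero := by
  intro l _
  unfold Spec_sumOddEvenZero sumOddEvenZero_alt
  rw [foldl_shift]
  simp
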